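-- pv_equiv track=rewrite | github.com/Waifus4Lifu/pi-gen-badges | stage2/04-badge/files/mcp.py | name_to_hex
-- ===== SOURCE A (Python) =====
-- import binascii
--
-- def name_to_hex(name):
--     name = name + "                "
--     name = name[:16]
--     hex_name = str(binascii.hexlify(bytes(name, 'utf-8')))[2:-1]
--     index = 0
--     formatted_hex_name = ""
--     for character in hex_name:
--         formatted_hex_name = formatted_hex_name + character
--         if index % 2 == 1:
--             formatted_hex_name = formatted_hex_name + " "
--         index += 1
--     return formatted_hex_name[:-1]
-- ===== SOURCE B (Python) =====
-- def name_to_hex(name):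
--     data = bytes((name + " " * 16)[:16], 'utf-8')
--     return ' '.join('{:02x}'.format(b) for b in data)
-- ===== Notes on version B (the rewrite author's own statement) =====
-- stated objective: simpler
-- what changed: B builds the padded 16-byte buffer and joins one two-hex-digit group per byte, instead of A's hexlify + str()[2:-1] slice and a character loop inserting spaces by index parity then trimming the trailing space.
import Mathlib
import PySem

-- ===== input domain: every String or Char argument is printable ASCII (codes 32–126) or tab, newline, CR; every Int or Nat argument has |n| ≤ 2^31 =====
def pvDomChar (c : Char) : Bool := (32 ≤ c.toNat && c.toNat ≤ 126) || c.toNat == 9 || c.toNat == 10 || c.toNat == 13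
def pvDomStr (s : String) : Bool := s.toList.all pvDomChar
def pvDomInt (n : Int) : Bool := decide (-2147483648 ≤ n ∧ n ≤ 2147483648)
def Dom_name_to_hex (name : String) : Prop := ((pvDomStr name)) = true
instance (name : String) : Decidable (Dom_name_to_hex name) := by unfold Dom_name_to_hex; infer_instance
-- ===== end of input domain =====

-- B formats one two-hex-digit group per padded byte and joins with spaces, replacing A's
-- hexlify + str()[2:-1] slice and its per-character parity loop; same return value, no side effects.

-- one lowercase hex digit (exact for 0 ≤ n < 16, all inputs here)
def pvHexDigit (n : Nat) : Char := if n < 10 then Char.ofNat (48 + n) else Char.ofNat (87 + n)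

-- ===== PORT A =====
-- str(binascii.hexlify(bytes(name,'utf-8')))[2:-1]: on the ASCII domain each byte is the
-- char code, hexlify emits its two lowercase hex digits, and the [2:-1] slice strips
-- exactly the b'…' wrapper; ported as this flatMap (exact on Dom).
def pvHexlify (bs : List Nat) : List Char :=
  bs.flatMap (fun b => [pvHexDigit (b / 16), pvHexDigit (b % 16)])

-- the for-loop over hex_name with (index, formatted_hex_name)
def pvALoop : List Char → Int → List Char → List Char
  | [], _, acc => acc
  | c :: rest, index, acc =>
      let acc := acc ++ [c]
      let acc := if PySem.Int.mod index 2 == 1 then acc ++ [' '] else acc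
      pvALoop rest (index + 1) acc

def name_to_hex (name : String) : String :=
  let padded := name.toList ++ "                ".toList          -- name + 16 spaces
  let name16 := PySem.List.slice padded none (some (16 : Int))    -- name[:16]
  let hexName := pvHexlify (name16.map Char.toNat)                -- bytes are char codes on Dom
  let formatted := pvALoop hexName 0 []
  String.ofList (PySem.List.slice formatted none (some (-1 : Int)))  -- [:-1]

-- ===== PORT B =====
def name_to_hex_alt (name : String) : String :=
  let data := ((name.toList ++ List.replicate 16 ' ').take 16).map Char.toNat
  String.ofList (List.intercalate [' ']
    (data.map (fun b => [pvHexDigit (b / 16), pvHexDigit (b % 16)])))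

-- ===== PRECONDITION & SPEC =====
def Spec_name_to_hex (name : String) (out : String) : Prop := out = name_to_hex_alt name
instance (name : String) (out : String) : Decidable (Spec_name_to_hex name out) := by unfold Spec_name_to_hex; infer_instance

-- ===== CLAIM (what is proved, stated in full; the proofs are below) =====
def Claim_equal_name_to_hex : Prop := ∀ (name : String), Dom_name_to_hex name → Spec_name_to_hex name (name_to_hex name)

-- ===== LEMMAS AND PROOFS =====

theorem pvALoop_flatMap (f : Nat → List Char) (h2 : ∀ b, ∃ c d, f b = [c, d]) :
    ∀ (l : List Nat) (k : Int) (acc : List Char),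
      pvALoop (l.flatMap f) (2 * k) acc = acc ++ l.flatMap (fun b => f b ++ [' ']) := by
  intro l
  induction l with
  | nil => intro k acc; simp [pvALoop]
  | cons b rest ih =>
      intro k acc
      obtain ⟨c, d, hf⟩ := h2 b
      have he : PySem.Int.mod (2 * k) 2 = 0 := by
        simp [PySem.Int.mod]
      have ho : PySem.Int.mod (2 * k + 1) 2 = 1 := by
        simp [PySem.Int.mod]
      have hk : 2 * k + 1 + 1 = 2 * (k + 1) := by ring
      simp only [List.flatMap_cons, hf, List.cons_append, List.nil_append, pvALoop, he, ho, hk]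
      rw [ih (k + 1)]
      simp

theorem dropLast_flatMap_space (g : Nat → List Char) :
    ∀ (l : List Nat), l ≠ [] →
      (l.flatMap (fun b => g b ++ [' '])).dropLast = List.intercalate [' '] (l.map g) := by
  intro l
  induction l with
  | nil => intro h; exact absurd rfl h
  | cons b rest ih =>
      intro _
      cases rest with
      | nil => simp [List.intercalate]
      | cons b' rest' =>
          have hne : (b' :: rest') ≠ ([] : List Nat) := by simp
          have : (g b ++ [' '] ++ (b' :: rest').flatMap (fun x => g x ++ [' '])).dropLast
              = g b ++ [' '] ++ ((b' :: rest').flatMap (fun x => g x ++ [' '])).dropLast := by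
            rw [List.dropLast_append_of_ne_nil]
            intro hnil
            have := congrArg List.length hnil
            simp [List.length_flatMap] at this
          simp only [List.flatMap_cons, ← List.append_assoc] at *
          rw [this, ih hne]
          simp [List.intercalate]

theorem name_to_hex_eq (name : String) : name_to_hex name = name_to_hex_alt name := by
  simp only [name_to_hex, name_to_hex_alt, pvHexlify]
  have hrepl : "                ".toList = List.replicate 16 ' ' := by decide
  rw [hrepl]
  set padded := name.toList ++ List.replicate 16 ' ' with hpadded
  have h16 : PySem.List.slice padded none (some (16 : Int)) = padded.take 16 := by
    exact_mod_cast PySem.List.slice_to_natCast padded 16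
  rw [h16]
  set data := (padded.take 16).map Char.toNat with hdata
  have hdne : data ≠ [] := by
    have hlen : padded.length ≥ 16 := by simp [hpadded]
    have : data.length = 16 := by simp [hdata]; omega
    intro hnil; rw [hnil] at this; simp at this
  have h2 : ∀ b, ∃ c d, [pvHexDigit (b / 16), pvHexDigit (b % 16)] = [c, d] :=
    fun b => ⟨_, _, rfl⟩
  have hloop := pvALoop_flatMap (fun b => [pvHexDigit (b / 16), pvHexDigit (b % 16)]) h2 data 0 []
  simp only [mul_zero] at hloop
  rw [hloop]
  rw [PySem.List.slice_to_neg_one]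
  simp only [List.nil_append]
  rw [dropLast_flatMap_space _ data hdne]

-- ===== VERDICT (by name: the statement is the Claim_ definition above) =====
theorem name_to_hex_spec : Claim_equal_name_to_hex := by
  intro name _
  exact name_to_hex_eq name
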